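-- pv_equiv track=rewrite | github.com/SvStranik/clear_code | task8.py | LineAnalysis
-- ===== SOURCE A (Python) =====
-- def LineAnalysis(CHARACTER_STRING):
--     is_Found = False
--     REFERENCE_SYMBOL = '*'
--     if CHARACTER_STRING == REFERENCE_SYMBOL * len(CHARACTER_STRING):
--         is_Found = True
--         return is_Found
--     if (CHARACTER_STRING[0] != REFERENCE_SYMBOL or
--         CHARACTER_STRING[len(CHARACTER_STRING)-1] != REFERENCE_SYMBOL):
--         return is_Found
--     first_formated_str = CHARACTER_STRING[1:len(CHARACTER_STRING)-1]
--     last_formated_str = (first_formated_str.replace('*',',')).split(',')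
--     for i in range(len(last_formated_str)-1):
--         if last_formated_str[i] != last_formated_str[i+1]: return is_Found
--     is_Found = True
--     return is_Found
-- ===== SOURCE B (Python) =====
-- def LineAnalysis(CHARACTER_STRING):
--     # One left-to-right scan: the line must be star-bounded and every field between
--     # delimiter characters (star or comma, the same delimiters A's replace-then-split
--     # uses) must equal the first field.  No replace, no split, no list of segments.
--     if CHARACTER_STRING == '':
--         return True
--     if CHARACTER_STRING[0] != '*' or CHARACTER_STRING[-1] != '*':
--         return False
--     first = None
--     field = ''
--     for ch in CHARACTER_STRING[1:]:
--         if ch == '*' or ch == ',':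
--             if first is None:
--                 first = field
--             elif field != first:
--                 return False
--             field = ''
--         else:
--             field = field + ch
--     return True
-- ===== Notes on version B (the rewrite author's own statement) =====
-- stated objective: simpler
-- what changed: A checks the all-star case, guards both end characters, materializes every segment via a replace-then-split pass and then compares adjacent segments by index in a second loop; B makes a single left-to-right scan that accumulates the current field and compares each completed field to the first one, with no replace, no split and no segment list.
import Mathlib
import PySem

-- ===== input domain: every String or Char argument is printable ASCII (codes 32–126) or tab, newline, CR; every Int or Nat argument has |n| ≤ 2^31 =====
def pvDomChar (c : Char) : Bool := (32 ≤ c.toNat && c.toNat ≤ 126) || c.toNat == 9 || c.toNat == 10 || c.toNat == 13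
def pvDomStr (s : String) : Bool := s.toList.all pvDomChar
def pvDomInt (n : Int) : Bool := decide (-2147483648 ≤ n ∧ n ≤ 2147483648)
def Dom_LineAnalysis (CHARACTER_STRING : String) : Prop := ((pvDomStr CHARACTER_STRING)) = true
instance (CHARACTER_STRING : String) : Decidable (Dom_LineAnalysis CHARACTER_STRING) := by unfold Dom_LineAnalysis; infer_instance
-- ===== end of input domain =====

-- B replaces A's all-star check + replace/split + index loop by one left-to-right scan that
-- compares each delimiter-separated field to the first ('simpler'); equivalence is proved for all strings.

-- ===== PORT A =====
-- helper for A's loop 'for i in range(len(last_formated_str)-1): if last[i] != last[i+1]: return False'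
def pvLoopA (P : List (List Char)) (idx : List Int) : Bool :=
  match idx with
  | [] => true
  | i :: rest =>
    match PySem.List.pyGet? P i, PySem.List.pyGet? P (i + 1) with
    | some a, some b => if a ≠ b then false else pvLoopA P rest
    | _, _ => false

def LineAnalysis (CHARACTER_STRING : String) : Bool :=
  let l := CHARACTER_STRING.toList
  if l = List.replicate l.length '*' then
    true
  else
    match PySem.List.pyGet? l 0, PySem.List.pyGet? l ((l.length : Int) - 1) with
    | some c0, some cl =>
      if c0 ≠ '*' ∨ cl ≠ '*' then
        false
      else
        let first_formated_str := PySem.List.slice l (some 1) (some ((l.length : Int) - 1))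
        let last_formated_str :=
          PySem.Chars.splitOn (PySem.Chars.replace first_formated_str ['*'] [',']) [',']
        pvLoopA last_formated_str (PySem.List.pyRange 0 ((last_formated_str.length : Int) - 1) 1)
    | _, _ => false  -- unreachable: the string is nonempty at this point

-- ===== PORT B =====
-- B's single scan over CHARACTER_STRING[1:]: 'first' is the first completed field, 'field' the current one
def pvScanB (cs : List Char) (first : Option (List Char)) (field : List Char) : Bool :=
  match cs with
  | [] => true
  | c :: rest =>
    if c = '*' ∨ c = ',' then
      match first with
      | none => pvScanB rest (some field) []
      | some f => if field ≠ f then false else pvScanB rest first []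
    else
      pvScanB rest first (field ++ [c])

def LineAnalysis_alt (CHARACTER_STRING : String) : Bool :=
  let l := CHARACTER_STRING.toList
  if l = [] then
    true
  else
    match PySem.List.pyGet? l 0, PySem.List.pyGet? l (-1) with
    | some c0, some cl =>
      if c0 ≠ '*' ∨ cl ≠ '*' then false
      else pvScanB (PySem.List.slice l (some 1) none) none []
    | _, _ => false  -- unreachable: the string is nonempty at this point

-- ===== PRECONDITION & SPEC =====
def Spec_LineAnalysis (CHARACTER_STRING : String) (out : Bool) : Prop := out = LineAnalysis_alt CHARACTER_STRING
instance (CHARACTER_STRING : String) (out : Bool) : Decidable (Spec_LineAnalysis CHARACTER_STRING out) := by unfold Spec_LineAnalysis; infer_instance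

-- ===== CLAIM (what is proved, stated in full; the proofs are below) =====
def Claim_equal_LineAnalysis : Prop := ∀ (CHARACTER_STRING : String), Dom_LineAnalysis CHARACTER_STRING → Spec_LineAnalysis CHARACTER_STRING (LineAnalysis CHARACTER_STRING)

-- ===== LEMMAS AND PROOFS =====

-- a character that ends a field (A splits on both, via its replace-then-split pass)
def pvDelim (c : Char) : Bool := c == '*' || c == ','

-- adjacent-equality of a list of pieces (what A's loop decides)
def pvChain : List (List Char) → Bool
  | [] => true
  | [_] => true
  | a :: b :: r => if a = b then pvChain (b :: r) else false

def pvStarComma (c : Char) : Char := if c = '*' then ',' else c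

lemma pvReplace_go (fuel : Nat) : ∀ (l acc : List Char), l.length ≤ fuel →
    PySem.Chars.replace.go ['*'] [','] fuel l acc = acc.reverse ++ l.map pvStarComma := by
  induction fuel with
  | zero =>
    intro l acc h
    have : l = [] := by cases l <;> simp_all
    subst this
    simp [PySem.Chars.replace.go]
  | succ n ih =>
    intro l acc h
    cases l with
    | nil => simp [PySem.Chars.replace.go]
    | cons c t =>
      by_cases hc : c = '*'
      · subst hc
        simp only [PySem.Chars.replace.go, List.isPrefixOf, BEq.rfl, Bool.true_and, if_pos,
          List.length_cons, List.length_nil, List.drop_succ_cons, List.drop_zero]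
        rw [ih t _ (by simpa using Nat.le_of_succ_le_succ h)]
        simp [pvStarComma]
      · have hpre : (['*'].isPrefixOf (c :: t)) = false := by
          simp [List.isPrefixOf]
          exact fun h => hc h.symm
        simp only [PySem.Chars.replace.go, hpre, Bool.false_eq_true, if_neg, not_false_iff]
        rw [ih t _ (Nat.le_of_succ_le_succ h)]
        simp [pvStarComma, hc]

lemma pvReplace (l : List Char) : PySem.Chars.replace l ['*'] [','] = l.map pvStarComma := by
  simp only [PySem.Chars.replace]
  rw [if_neg (by simp)]
  simpa using pvReplace_go l.length l [] le_rfl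

lemma pvModifyHead_nil (P : List (List Char)) :
    List.modifyHead (fun x => [] ++ x) P = P := by
  cases P <;> simp

lemma pvModifyHead_id (P : List (List Char)) :
    List.modifyHead (fun x => x) P = P := by
  cases P <;> simp

lemma pvSplitGo (fuel : Nat) : ∀ (l cur : List Char) (acc : List (List Char)), l.length ≤ fuel →
    PySem.Chars.splitOn.go [','] fuel l cur acc =
      acc.reverse ++ List.modifyHead (fun x => cur.reverse ++ x) (List.splitOnP (fun c => c == ',') l) := by
  induction fuel with
  | zero =>
    intro l cur acc h
    have : l = [] := by cases l <;> simp_all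
    subst this
    simp [PySem.Chars.splitOn.go, List.splitOnP_nil]
  | succ n ih =>
    intro l cur acc h
    cases l with
    | nil => simp [PySem.Chars.splitOn.go, List.splitOnP_nil]
    | cons c t =>
      by_cases hc : c = ','
      · subst hc
        simp only [PySem.Chars.splitOn.go, List.isPrefixOf, BEq.rfl, Bool.true_and, if_pos,
          List.length_cons, List.length_nil, List.drop_succ_cons, List.drop_zero]
        rw [ih t [] _ (by simpa using Nat.le_of_succ_le_succ h)]
        simp [List.splitOnP_cons, pvModifyHead_nil, pvModifyHead_id]
      · have hpre : ([','].isPrefixOf (c :: t)) = false := by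
          simp [List.isPrefixOf]
          exact fun h => hc h.symm
        simp only [PySem.Chars.splitOn.go, hpre, Bool.false_eq_true, if_neg, not_false_iff]
        rw [ih t (c :: cur) acc (Nat.le_of_succ_le_succ h)]
        rw [List.splitOnP_cons]
        simp only [hc, beq_iff_eq, if_neg, not_false_iff]
        obtain ⟨p, q, hpq⟩ := List.exists_cons_of_ne_nil (List.splitOnP_ne_nil _ t)
        rw [hpq]
        simp

lemma pvSplitOn (l : List Char) :
    PySem.Chars.splitOn l [','] = List.splitOnP (fun c => c == ',') l := by
  simp only [PySem.Chars.splitOn]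
  rw [pvSplitGo (l.length + 1) l [] [] (by omega)]
  simp [pvModifyHead_id]

lemma pvSplit_map (l : List Char) :
    List.splitOnP (fun c => c == ',') (l.map pvStarComma) = List.splitOnP pvDelim l := by
  induction l with
  | nil => simp [List.splitOnP_nil]
  | cons c t ih =>
    by_cases hc : pvDelim c
    · have : pvStarComma c = ',' := by
        simp [pvDelim] at hc
        rcases hc with h | h <;> simp [pvStarComma, h]
      simp [List.splitOnP_cons, this, hc, ih]
    · have h1 : pvStarComma c = c := by
        simp [pvDelim] at hc
        simp [pvStarComma, hc.1]
      have h2 : (c == ',') = false := by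
        simp [pvDelim] at hc
        simp [hc.2]
      simp [List.splitOnP_cons, h1, h2, hc, ih]

lemma pvChain_cons (rest : List (List Char)) : ∀ p, pvChain (p :: rest) = rest.all (fun q => q == p) := by
  induction rest with
  | nil => intro p; simp [pvChain]
  | cons q r ih =>
    intro p
    by_cases h : p = q
    · subst h
      simp [pvChain, ih]
    · simp [pvChain, h, Ne.symm h]

lemma pvSplit_free (field : List Char) : ∀ (l : List Char), (∀ c ∈ field, pvDelim c = false) →
    List.splitOnP pvDelim (field ++ l)
      = List.modifyHead (fun x => field ++ x) (List.splitOnP pvDelim l) := by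
  induction field with
  | nil => intro l _; simp [pvModifyHead_id]
  | cons c f ih =>
    intro l h
    have hc : pvDelim c = false := h c (by simp)
    rw [List.cons_append, List.splitOnP_cons]
    simp only [hc, Bool.false_eq_true, if_neg, not_false_iff]
    rw [ih l (fun x hx => h x (by simp [hx]))]
    obtain ⟨p, q, hpq⟩ := List.exists_cons_of_ne_nil (List.splitOnP_ne_nil pvDelim l)
    rw [hpq]
    simp

lemma pvSplit_free_self (field : List Char) (h : ∀ c ∈ field, pvDelim c = false) :
    List.splitOnP pvDelim field = [field] := by
  have := pvSplit_free field [] h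
  simpa [List.splitOnP_nil] using this

lemma pvDelim_iff (c : Char) : (c = '*' ∨ c = ',') ↔ pvDelim c = true := by
  simp [pvDelim]

lemma pvScan_some (cs : List Char) : ∀ (f field : List Char), (∀ c ∈ field, pvDelim c = false) →
    pvScanB (cs ++ ['*']) (some f) field
      = (List.splitOnP pvDelim (field ++ cs)).all (fun q => q == f) := by
  induction cs with
  | nil =>
    intro f field hfree
    rw [List.append_nil, pvSplit_free_self field hfree]
    by_cases h : field = f <;> simp [pvScanB, h]
  | cons c t ih =>
    intro f field hfree
    by_cases hc : pvDelim c
    · have hsplit : List.splitOnP pvDelim (field ++ c :: t) = field :: List.splitOnP pvDelim t := by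
        rw [pvSplit_free field _ hfree, List.splitOnP_cons]
        simp [hc]
      rw [hsplit]
      have horc : (c = '*' ∨ c = ',') := (pvDelim_iff c).mpr hc
      by_cases h : field = f
      · simp only [List.cons_append, pvScanB, horc, if_pos, h, ne_eq, not_true_eq_false,
          if_neg, not_false_iff]
        rw [ih f [] (by simp)]
        simp [h]
      · simp [pvScanB, horc, h]
    · have horc : ¬ (c = '*' ∨ c = ',') := fun hh => by rw [(pvDelim_iff c).mp hh] at hc; exact hc rfl
      have hfree' : ∀ x ∈ field ++ [c], pvDelim x = false := by
        intro x hx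
        rcases List.mem_append.mp hx with h | h
        · exact hfree x h
        · simp at h; subst h; simpa using hc
      rw [List.cons_append, pvScanB.eq_def]
      simp only [horc, if_neg, not_false_iff]
      rw [ih f (field ++ [c]) hfree']
      rw [List.append_assoc]
      simp

lemma pvScan_none (cs : List Char) : ∀ (field : List Char), (∀ c ∈ field, pvDelim c = false) →
    pvScanB (cs ++ ['*']) none field = pvChain (List.splitOnP pvDelim (field ++ cs)) := by
  induction cs with
  | nil =>
    intro field hfree
    rw [List.append_nil, pvSplit_free_self field hfree]
    simp [pvScanB, pvChain]
  | cons c t ih =>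
    intro field hfree
    by_cases hc : pvDelim c
    · have hsplit : List.splitOnP pvDelim (field ++ c :: t) = field :: List.splitOnP pvDelim t := by
        rw [pvSplit_free field _ hfree, List.splitOnP_cons]
        simp [hc]
      rw [hsplit, pvChain_cons]
      have horc : (c = '*' ∨ c = ',') := (pvDelim_iff c).mpr hc
      simp only [List.cons_append, pvScanB, horc, if_pos]
      rw [pvScan_some t field [] (by simp)]
      simp
    · have horc : ¬ (c = '*' ∨ c = ',') := fun hh => by rw [(pvDelim_iff c).mp hh] at hc; exact hc rfl
      have hfree' : ∀ x ∈ field ++ [c], pvDelim x = false := by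
        intro x hx
        rcases List.mem_append.mp hx with h | h
        · exact hfree x h
        · simp at h; subst h; simpa using hc
      rw [List.cons_append, pvScanB.eq_def]
      simp only [horc, if_neg, not_false_iff]
      rw [ih (field ++ [c]) hfree']
      rw [List.append_assoc]
      simp

lemma pvLoopA_range (n : Nat) : ∀ (a : Nat) (P : List (List Char)), P.length - a ≤ n →
    pvLoopA P (PySem.List.pyRange (a : Int) ((P.length : Int) - 1) 1) = pvChain (P.drop a) := by
  induction n with
  | zero =>
    intro a P h
    have hla : P.length ≤ a := by omega
    rw [PySem.List.pyRange_one_eq_nil (by push_cast; omega)]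
    rw [List.drop_eq_nil_of_le hla]
    simp [pvLoopA, pvChain]
  | succ n ih =>
    intro a P h
    by_cases hla : P.length ≤ a
    · rw [PySem.List.pyRange_one_eq_nil (by push_cast; omega)]
      rw [List.drop_eq_nil_of_le hla]
      simp [pvLoopA, pvChain]
    · push_neg at hla
      by_cases hend : a + 1 = P.length
      · rw [PySem.List.pyRange_one_eq_nil (by push_cast; omega)]
        rw [List.drop_eq_getElem_cons hla, List.drop_eq_nil_of_le (by omega)]
        simp [pvLoopA, pvChain]
      · have ha1 : a + 1 < P.length := by omega
        rw [PySem.List.pyRange_one_cons (by push_cast; omega)]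
        have hget1 : PySem.List.pyGet? P ((a : Int)) = some P[a] := by
          rw [PySem.List.pyGet?_natCast]
          exact List.getElem?_eq_getElem hla
        have hcast : ((a : Int) + 1) = ((a + 1 : Nat) : Int) := by push_cast; ring
        have hget2 : PySem.List.pyGet? P ((a : Int) + 1) = some P[a+1] := by
          rw [hcast, PySem.List.pyGet?_natCast]
          exact List.getElem?_eq_getElem ha1
        simp only [pvLoopA, hget1, hget2]
        have hdrop : P.drop a = P[a] :: (P[a+1] :: P.drop (a + 2)) := by
          rw [List.drop_eq_getElem_cons hla, List.drop_eq_getElem_cons ha1]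
        have hchain : pvChain (P[a] :: (P[a+1] :: P.drop (a + 2)))
            = if P[a] = P[a+1] then pvChain (P[a+1] :: P.drop (a + 2)) else false := rfl
        by_cases heq : P[a] = P[a+1]
        · simp only [heq, ne_eq, not_true_eq_false, Bool.false_eq_true, if_false, if_neg,
            not_false_iff]
          rw [hcast, ih (a+1) P (by omega)]
          rw [hdrop, hchain, if_pos heq, List.drop_eq_getElem_cons ha1]
        · simp only [heq, ne_eq, not_false_iff, if_pos]
          rw [hdrop, hchain, if_neg heq]

lemma pvScan_star_some : ∀ (m : Nat), pvScanB (List.replicate m '*') (some []) [] = true := by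
  intro m
  induction m with
  | zero => simp [pvScanB]
  | succ n ih => simpa [List.replicate_succ, pvScanB] using ih

lemma pvScan_star_none (m : Nat) : pvScanB (List.replicate m '*') none [] = true := by
  cases m with
  | zero => simp [pvScanB]
  | succ n => simpa [List.replicate_succ, pvScanB] using pvScan_star_some n

lemma pvGet0 (c : Char) (t : List Char) : PySem.List.pyGet? (c :: t) 0 = some c := by
  rw [show (0 : Int) = ((0 : Nat) : Int) from rfl, PySem.List.pyGet?_natCast]
  rfl

-- ===== VERDICT (by name: the statement is the Claim_ definition above) =====
theorem LineAnalysis_spec : Claim_equal_LineAnalysis := by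
  unfold Claim_equal_LineAnalysis Spec_LineAnalysis
  intro s _
  unfold LineAnalysis LineAnalysis_alt
  generalize s.toList = l
  by_cases hstar : l = List.replicate l.length '*'
  · -- A returns True on an all-star (possibly empty) string; so does B
    rw [if_pos hstar]
    cases hl : l with
    | nil => simp [hl]
    | cons c t =>
      subst hl
      rw [List.length_cons, List.replicate_succ, List.cons_eq_cons] at hstar
      obtain ⟨hc, ht⟩ := hstar
      subst hc
      rw [if_neg (by simp)]
      rw [pvGet0]
      have hgetlast : PySem.List.pyGet? ('*' :: t) (-1) = some '*' := by
        cases hk : t.length with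
        | zero =>
          have : t = [] := List.eq_nil_of_length_eq_zero hk
          subst this
          rw [show ('*' :: ([] : List Char)) = [] ++ ['*'] from rfl,
            PySem.List.pyGet?_neg_one_append_singleton]
        | succ k =>
          rw [ht, hk, List.replicate_succ']
          rw [show ('*' :: (List.replicate k '*' ++ ['*'])) = ('*' :: List.replicate k '*') ++ ['*'] from rfl,
            PySem.List.pyGet?_neg_one_append_singleton]
      rw [hgetlast]
      dsimp only
      rw [if_neg (by simp)]
      rw [PySem.List.slice_from_one]
      simp only [List.tail_cons]
      rw [ht]
      exact (pvScan_star_none t.length).symm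
  · -- not all stars: in particular l ≠ []
    rw [if_neg hstar]
    have hne : l ≠ [] := by
      intro h; exact hstar (by simp [h])
    obtain ⟨c, t, hl⟩ := List.exists_cons_of_ne_nil hne
    subst hl
    rw [if_neg (by simp)]
    rw [pvGet0]
    cases ht : t with
    | nil =>
      -- a single character, not '*'
      subst ht
      have hc : c ≠ '*' := by
        intro h; subst h; exact hstar (by simp)
      rw [show ((([c] : List Char).length : Int) - 1) = ((0 : Nat) : Int) by simp]
      rw [PySem.List.pyGet?_natCast]
      rw [show (([c] : List Char))[(0 : Nat)]? = some c from rfl]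
      rw [show ([c] : List Char) = [] ++ [c] from rfl, PySem.List.pyGet?_neg_one_append_singleton]
      dsimp only
      rw [if_pos (Or.inl hc), if_pos (Or.inl hc)]
    | cons c1 t1 =>
      obtain ⟨mid, y, hmid⟩ : ∃ mid y, t = mid ++ [y] := by
        rcases List.eq_nil_or_concat t with h | ⟨mid, y, h⟩
        · simp [h] at ht
        · exact ⟨mid, y, by simpa [List.concat_eq_append] using h⟩
      rw [← ht] at *
      clear ht
      subst hmid
      have hlenint : (((c :: (mid ++ [y])).length : Int) - 1) = ((mid.length + 1 : Nat) : Int) := by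
        simp
      have hgetA : PySem.List.pyGet? (c :: (mid ++ [y])) (((c :: (mid ++ [y])).length : Int) - 1)
          = some y := by
        rw [hlenint, PySem.List.pyGet?_natCast]
        rw [show (c :: (mid ++ [y])) = (c :: mid) ++ [y] from rfl]
        rw [show mid.length + 1 = (c :: mid).length from rfl]
        exact List.getElem?_concat_length
      have hgetB : PySem.List.pyGet? (c :: (mid ++ [y])) (-1) = some y := by
        rw [show (c :: (mid ++ [y])) = (c :: mid) ++ [y] from rfl,
          PySem.List.pyGet?_neg_one_append_singleton]
      rw [hgetA, hgetB]
      dsimp only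
      by_cases hbad : c ≠ '*' ∨ y ≠ '*'
      · rw [if_pos hbad, if_pos hbad]
      · rw [if_neg hbad, if_neg hbad]
        push_neg at hbad
        obtain ⟨hc, hy⟩ := hbad
        subst hc
        subst hy
        -- A side: the slice between the outer stars is mid
        have hsliceA : PySem.List.slice ('*' :: (mid ++ ['*'])) (some 1)
            (some ((((('*' : Char) :: (mid ++ ['*'])).length : Int)) - 1)) = mid := by
          rw [hlenint]
          rw [show (1 : Int) = ((1 : Nat) : Int) from rfl, PySem.List.slice_natCast]
          simp only [List.drop_one, List.tail_cons]
          rw [show mid.length + 1 - 1 = mid.length from rfl]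
          exact List.take_left
        rw [hsliceA]
        rw [pvReplace, pvSplitOn, pvSplit_map]
        have hA := pvLoopA_range (List.splitOnP pvDelim mid).length 0 (List.splitOnP pvDelim mid)
          (by omega)
        simp only [Nat.cast_zero, List.drop_zero] at hA
        rw [hA]
        -- B side: the scan runs over mid ++ ['*']
        rw [PySem.List.slice_from_one]
        simp only [List.tail_cons]
        rw [pvScan_none mid [] (by simp)]
        simp
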